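-- pv_equiv track=rewrite | github.com/envemocesur/practica3_entornos_tests | adivina_palabra.py | generar_frase
-- ===== SOURCE A (Python) =====
-- def generar_frase(FRASE, lista_intentos_letra_totales):
--     frase_acertar = ""
--     for _letra in FRASE:
--         caracter = '+'
--         if _letra == ' ':
--             caracter = ' '
--         for __letra in lista_intentos_letra_totales:
--             if _letra == __letra:
--                 caracter = _letra
--         frase_acertar += caracter
--     return frase_acertar
-- ===== SOURCE B (Python) =====
-- def generar_frase(FRASE, lista_intentos_letra_totales):
--     # Build base mask first, then reveal positions per guessed letter.
--     res = [' ' if c == ' ' else '+' for c in FRASE]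
--     for letra in lista_intentos_letra_totales:
--         for i in range(len(FRASE)):
--             if FRASE[i] == letra:
--                 res[i] = FRASE[i]
--     return ''.join(res)
-- ===== Notes on version B (the rewrite author's own statement) =====
-- stated objective: alternative
-- what changed: Instead of scanning the guess list per character, B first builds the masked string in one pass and then reveals positions with an outer loop over the guessed letters.
import Mathlib
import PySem

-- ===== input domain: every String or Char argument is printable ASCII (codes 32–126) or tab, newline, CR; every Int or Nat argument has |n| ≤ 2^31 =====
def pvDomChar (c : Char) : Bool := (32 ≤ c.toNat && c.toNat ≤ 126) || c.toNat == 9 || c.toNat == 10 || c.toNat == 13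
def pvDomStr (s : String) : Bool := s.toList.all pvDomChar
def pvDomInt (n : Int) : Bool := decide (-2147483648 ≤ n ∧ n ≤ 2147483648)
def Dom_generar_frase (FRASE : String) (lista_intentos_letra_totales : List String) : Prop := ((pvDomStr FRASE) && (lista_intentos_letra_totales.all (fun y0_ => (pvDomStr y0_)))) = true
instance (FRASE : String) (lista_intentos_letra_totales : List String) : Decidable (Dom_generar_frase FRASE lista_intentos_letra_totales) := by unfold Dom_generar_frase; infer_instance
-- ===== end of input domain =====

-- B builds the base mask in one pass and then reveals positions per guessed letter (alternative decomposition, same cost).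

-- ===== PORT A =====
-- per character: start from '+' (or ' '), scan the whole guess list, last match wins;
-- Python's `_letra == __letra` compares the 1-char string of _letra with the guess, ported as `String.mk [c] = s`
def generar_frase (FRASE : String) (lista_intentos_letra_totales : List String) : String :=
  String.mk (FRASE.toList.foldl (fun acc c =>
    let caracter : Char := if c = ' ' then ' ' else '+'
    let caracter := lista_intentos_letra_totales.foldl
      (fun car s => if String.mk [c] = s then c else car) caracter
    acc ++ [caracter]) [])

-- ===== PORT B =====
-- base mask built first (map), then one reveal pass per guessed letter (foldl over the guesses)
def generar_frase_alt (FRASE : String) (lista_intentos_letra_totales : List String) : String :=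
  String.mk (lista_intentos_letra_totales.foldl
    (fun res letra =>
      ((FRASE.toList).zip res).map (fun p => if String.mk [p.1] = letra then p.1 else p.2))
    (FRASE.toList.map (fun c => if c = ' ' then ' ' else '+')))

-- ===== PRECONDITION & SPEC =====
def Spec_generar_frase (FRASE : String) (lista_intentos_letra_totales : List String) (out : String) : Prop := out = generar_frase_alt FRASE lista_intentos_letra_totales
instance (FRASE : String) (lista_intentos_letra_totales : List String) (out : String) : Decidable (Spec_generar_frase FRASE lista_intentos_letra_totales out) := by unfold Spec_generar_frase; infer_instance

-- ===== CLAIM (what is proved, stated in full; the proofs are below) =====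
def Claim_equal_generar_frase : Prop := ∀ (FRASE : String) (lista_intentos_letra_totales : List String), Dom_generar_frase FRASE lista_intentos_letra_totales → Spec_generar_frase FRASE lista_intentos_letra_totales (generar_frase FRASE lista_intentos_letra_totales)

-- ===== LEMMAS AND PROOFS =====

-- A's inner scan: every match rewrites to c itself, so it is "c if some guess matches, else the base"
theorem inner_foldl_eq (c : Char) (lst : List String) (car : Char) :
    lst.foldl (fun car s => if String.mk [c] = s then c else car) car
      = if lst.any (fun s => String.mk [c] = s) then c else car := by
  induction lst generalizing car with
  | nil => simp
  | cons s t ih =>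
    simp only [List.foldl_cons, List.any_cons, ih]
    by_cases h : String.mk [c] = s <;> simp [h]

-- A's loop body, with the `let`s resolved by inner_foldl_eq
theorem stepA_eq (lst : List String) :
    (fun (acc : List Char) (c : Char) =>
      let caracter : Char := if c = ' ' then ' ' else '+'
      let caracter := lst.foldl (fun car s => if String.mk [c] = s then c else car) caracter
      acc ++ [caracter])
    = fun acc c => acc ++ [if lst.any (fun s => String.mk [c] = s) then c
        else if c = ' ' then ' ' else '+'] := by
  funext acc c
  simp only [inner_foldl_eq]

-- A's outer loop is a map over the characters
theorem portA_map (cs : List Char) (lst : List String) (acc : List Char) :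
    cs.foldl (fun acc c =>
      let caracter : Char := if c = ' ' then ' ' else '+'
      let caracter := lst.foldl (fun car s => if String.mk [c] = s then c else car) caracter
      acc ++ [caracter]) acc
    = acc ++ cs.map (fun c =>
        if lst.any (fun s => String.mk [c] = s) then c
        else if c = ' ' then ' ' else '+') := by
  rw [stepA_eq, PySem.List.foldl_append_singleton_eq_map]

-- one reveal pass over (characters, current mask) acts pointwise on each character
theorem reveal_pointwise (cs : List Char) (h : Char → Char) (s : String) :
    (cs.zip (cs.map h)).map (fun p => if String.mk [p.1] = s then p.1 else p.2)
      = cs.map (fun c => if String.mk [c] = s then c else h c) := by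
  induction cs with
  | nil => simp
  | cons c t ih => simp [ih]

-- B's fold over the guesses is therefore also a pointwise map
theorem portB_map (cs : List Char) (lst : List String) (h : Char → Char) :
    lst.foldl (fun res letra => (cs.zip res).map (fun p => if String.mk [p.1] = letra then p.1 else p.2))
      (cs.map h)
    = cs.map (fun c => if lst.any (fun s => String.mk [c] = s) then c else h c) := by
  induction lst generalizing h with
  | nil => simp
  | cons s t ih =>
    simp only [List.foldl_cons]
    rw [reveal_pointwise, ih]
    apply List.map_congr_left
    intro c _
    by_cases hc : String.mk [c] = s <;> simp [hc]

-- ===== VERDICT (by name: the statement is the Claim_ definition above) =====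
theorem generar_frase_spec : Claim_equal_generar_frase := by
  intro F lst _
  unfold Spec_generar_frase generar_frase generar_frase_alt
  rw [portA_map, portB_map, List.nil_append]
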